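-- pv_equiv track=rewrite | github.com/nicorl/codewars | 4 kyu/golfers.py | norepiteenelmismodia
-- ===== SOURCE A (Python) =====
-- def norepiteenelmismodia(golfer, listadeldia):
--     valor = 0
--     for equipo in listadeldia:
--         for golf in equipo:
--             if equipo.count(golf) > 1:
--                 return False
--             for i in range(0,len(listadeldia)):
--                 if golf in listadeldia[i]:
--                     valor += 1
--                     if valor > 1:
--                         return False
--             valor = 0
--     return True
-- ===== SOURCE B (Python) =====
-- def norepiteenelmismodia(golfer, listadeldia):
--     todos = [g for equipo in listadeldia for g in equipo]
--     return len(todos) == len(set(todos))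
-- ===== Notes on version B (the rewrite author's own statement) =====
-- stated objective: simpler
-- what changed: A scans per golfer with a within-team count and a nested membership scan over all teams with early returns; B flattens all teams into one list and compares its length with the size of its set, a single build-a-set pass.
import Mathlib
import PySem

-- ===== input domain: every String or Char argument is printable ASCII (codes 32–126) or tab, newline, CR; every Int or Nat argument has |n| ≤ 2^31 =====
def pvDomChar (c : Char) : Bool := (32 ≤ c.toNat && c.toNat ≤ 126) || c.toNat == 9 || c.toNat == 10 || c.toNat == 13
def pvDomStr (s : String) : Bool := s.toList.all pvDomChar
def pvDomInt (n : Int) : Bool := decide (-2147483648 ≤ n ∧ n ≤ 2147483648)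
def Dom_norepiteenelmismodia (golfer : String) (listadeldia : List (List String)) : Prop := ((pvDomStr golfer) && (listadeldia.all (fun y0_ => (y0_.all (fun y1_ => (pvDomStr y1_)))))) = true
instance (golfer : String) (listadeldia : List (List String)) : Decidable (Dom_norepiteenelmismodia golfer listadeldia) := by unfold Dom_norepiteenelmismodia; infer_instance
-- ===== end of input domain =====

-- B replaces A's per-golfer nested scans (within-team count + membership test over every team,
-- with early returns) by flattening all teams and comparing the flat list's length with its set's size (objective: simpler).

-- ===== PORT A =====
-- inner 'for i in range(0,len(listadeldia))' loop for one golf; `none` = early `return False`,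
-- `some v` = loop finished with valor = v (the index loop visits the teams in order, so it is
-- transcribed as structural recursion over the team list).
def pvInnerA (golf : String) : List (List String) → Int → Option Int
  | [], valor => some valor
  | eq :: rest, valor =>
    if golf ∈ eq then
      if valor + 1 > 1 then none else pvInnerA golf rest (valor + 1)
    else pvInnerA golf rest valor

-- 'for golf in equipo' loop; false = an early `return False` fired
def pvGolfLoopA (equipo : List String) (all : List (List String)) : List String → Bool
  | [] => true
  | golf :: gs =>
    if PySem.List.count equipo golf > 1 then false
    else
      match pvInnerA golf all 0 with
      | none => false              -- valor exceeded 1 inside the index loop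
      | some _ => pvGolfLoopA equipo all gs   -- 'valor = 0' reset, loop continues

-- outer 'for equipo in listadeldia' loop
def pvTeamLoopA (all : List (List String)) : List (List String) → Bool
  | [] => true
  | eq :: rest => if pvGolfLoopA eq all eq then pvTeamLoopA all rest else false

def norepiteenelmismodia (golfer : String) (listadeldia : List (List String)) : Bool :=
  pvTeamLoopA listadeldia listadeldia

-- ===== PORT B =====
def norepiteenelmismodia_alt (golfer : String) (listadeldia : List (List String)) : Bool :=
  let todos := listadeldia.flatMap (fun equipo => equipo)
  todos.length == (PySem.Set.ofList todos).length

-- ===== PRECONDITION & SPEC =====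
def Spec_norepiteenelmismodia (golfer : String) (listadeldia : List (List String)) (out : Bool) : Prop := out = norepiteenelmismodia_alt golfer listadeldia
instance (golfer : String) (listadeldia : List (List String)) (out : Bool) : Decidable (Spec_norepiteenelmismodia golfer listadeldia out) := by unfold Spec_norepiteenelmismodia; infer_instance

-- ===== CLAIM (what is proved, stated in full; the proofs are below) =====
def Claim_equal_norepiteenelmismodia : Prop := ∀ (golfer : String) (listadeldia : List (List String)), Dom_norepiteenelmismodia golfer listadeldia → Spec_norepiteenelmismodia golfer listadeldia (norepiteenelmismodia golfer listadeldia)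

-- ===== LEMMAS AND PROOFS =====

-- A's inner index loop returns early (None) iff valor plus the number of teams containing golf
-- exceeds 1 (valor is 0 or 1 whenever the loop runs in A)
theorem pvInnerA_none_iff (golf : String) (rest : List (List String)) (v : Int)
    (h0 : 0 ≤ v) (h1 : v ≤ 1) :
    pvInnerA golf rest v = none ↔ 1 < v + (rest.countP (fun e => decide (golf ∈ e)) : Int) := by
  induction rest generalizing v with
  | nil => simp [pvInnerA]; omega
  | cons eq rest ih =>
    by_cases h : golf ∈ eq
    · by_cases hv : v + 1 > 1
      · simp only [pvInnerA, if_pos h, if_pos hv, List.countP_cons, h, decide_true, if_true]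
        constructor
        · intro _; push_cast; omega
        · intro _; trivial
      · simp only [pvInnerA, if_pos h, if_neg hv, List.countP_cons, h, decide_true, if_true]
        rw [ih (v + 1) (by omega) (by omega)]
        push_cast
        omega
    · simp only [pvInnerA, if_neg h, List.countP_cons, h, decide_false, if_false]
      rw [ih v h0 h1]
      push_cast
      omega

-- A's per-team golfer loop succeeds iff every listed golfer is unique in the team and lies in at most one team
theorem pvGolfLoopA_true_iff (equipo : List String) (all : List (List String)) (gs : List String) :
    pvGolfLoopA equipo all gs = true ↔
      ∀ g ∈ gs, List.count g equipo ≤ 1 ∧ all.countP (fun e => decide (g ∈ e)) ≤ 1 := by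
  induction gs with
  | nil => simp [pvGolfLoopA]
  | cons golf gs ih =>
    by_cases hc : PySem.List.count equipo golf > 1
    · simp only [pvGolfLoopA, if_pos hc]
      rw [PySem.List.count_eq] at hc
      simp only [Bool.false_eq_true, false_iff, not_forall]
      refine ⟨golf, by simp, ?_⟩
      intro hcontra
      exact absurd hcontra.1 (by omega)
    · simp only [pvGolfLoopA, if_neg hc]
      rw [PySem.List.count_eq] at hc
      rcases hinner : pvInnerA golf all 0 with _ | w
      · have h1 := (pvInnerA_none_iff golf all 0 (by omega) (by omega)).mp hinner
        simp only [Bool.false_eq_true, false_iff, not_forall]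
        refine ⟨golf, by simp, ?_⟩
        intro hcontra
        have := hcontra.2
        omega
      · have h1 : ¬ pvInnerA golf all 0 = none := by simp [hinner]
        have h2 : ¬ (1 < (0 : Int) + (all.countP (fun e => decide (golf ∈ e)) : Int)) := by
          intro hlt
          exact h1 ((pvInnerA_none_iff golf all 0 (by omega) (by omega)).mpr hlt)
        simp only [ih, List.mem_cons, forall_eq_or_imp]
        constructor
        · intro h; exact ⟨⟨by omega, by omega⟩, h⟩
        · intro h; exact h.2

-- A's outer loop succeeds iff every team passes the golfer loop
theorem pvTeamLoopA_true_iff (all L : List (List String)) :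
    pvTeamLoopA all L = true ↔ ∀ eq ∈ L, pvGolfLoopA eq all eq = true := by
  induction L with
  | nil => simp [pvTeamLoopA]
  | cons eq rest ih =>
    by_cases h : pvGolfLoopA eq all eq
    · simp [pvTeamLoopA, h, ih]
    · simp [pvTeamLoopA, h]

-- the condition A checks over the whole day list IS "the flattened list has no duplicate"
theorem pvOK_iff_nodup (L : List (List String)) :
    (∀ eq ∈ L, ∀ g ∈ eq, List.count g eq ≤ 1 ∧ L.countP (fun e => decide (g ∈ e)) ≤ 1) ↔
      (L.flatMap (fun equipo => equipo)).Nodup := by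
  induction L with
  | nil => simp
  | cons e rest ih =>
    rw [List.flatMap_cons, List.nodup_append]
    constructor
    · intro h
      have he : e.Nodup := by
        rw [List.nodup_iff_count_le_one]
        intro a
        by_cases ha : a ∈ e
        · exact (h e (by simp) a ha).1
        · simp [List.count_eq_zero_of_not_mem ha]
      have hdisj : ∀ g ∈ e, g ∉ rest.flatMap (fun equipo => equipo) := by
        intro g hg hmem
        have hle := (h e (by simp) g hg).2
        rw [List.countP_cons] at hle
        simp only [hg, decide_true, if_true] at hle
        rw [List.mem_flatMap] at hmem
        obtain ⟨eq, heq, hgeq⟩ := hmem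
        have hpos : 0 < rest.countP (fun e => decide (g ∈ e)) :=
          List.countP_pos_iff.mpr ⟨eq, heq, by simpa using hgeq⟩
        omega
      refine ⟨he, ?_, ?_⟩
      · rw [← ih]
        intro eq heq g hg
        refine ⟨(h eq (by simp [heq]) g hg).1, ?_⟩
        have hle := (h eq (by simp [heq]) g hg).2
        rw [List.countP_cons] at hle
        omega
      · intro a ha b hb heq; exact hdisj a ha (heq ▸ hb)
    · rintro ⟨he, hrest, hdisj⟩
      have hrest' := ih.mpr hrest
      have hdisj' : ∀ g ∈ e, g ∉ rest.flatMap (fun equipo => equipo) :=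
        fun g hg hmem => hdisj g hg g hmem rfl
      intro eq heq g hg
      rcases List.mem_cons.mp heq with rfl | heq'
      · refine ⟨(List.nodup_iff_count_le_one.mp he) g, ?_⟩
        rw [List.countP_cons]
        simp only [hg, decide_true, if_true]
        have hz : rest.countP (fun e => decide (g ∈ e)) = 0 := by
          rw [List.countP_eq_zero]
          intro e' he'
          simp only [decide_eq_true_eq]
          intro hge'
          exact hdisj' g hg (List.mem_flatMap.mpr ⟨e', he', hge'⟩)
        omega
      · have hginflat : g ∈ rest.flatMap (fun equipo => equipo) :=
          List.mem_flatMap.mpr ⟨eq, heq', hg⟩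
        refine ⟨(hrest' eq heq' g hg).1, ?_⟩
        rw [List.countP_cons]
        have hgne : ¬ g ∈ e := fun hge => hdisj' g hge hginflat
        simp only [hgne, decide_false, Bool.false_eq_true, if_false]
        have := (hrest' eq heq' g hg).2
        omega

-- building the Python set never grows past the input: length bound for foldl add
theorem pvFoldlAdd_length_le (xs s : List String) :
    (List.foldl PySem.Set.add s xs).length ≤ s.length + xs.length := by
  induction xs generalizing s with
  | nil => simp
  | cons x xs ih =>
    simp only [List.foldl_cons, List.length_cons]
    by_cases h : PySem.Set.contains s x
    · simp only [PySem.Set.add, if_pos h]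
      have := ih s; omega
    · simp only [PySem.Set.add, if_neg h]
      have := ih (s ++ [x])
      simp only [List.length_append, List.length_cons, List.length_nil] at this
      omega

-- membership form of Set.contains
theorem pvContains_iff (s : List String) (x : String) : PySem.Set.contains s x = true ↔ x ∈ s := by
  simp [PySem.Set.contains]

-- the set keeps every element of the input: equality of lengths characterises "no new duplicates"
theorem pvFoldlAdd_length_eq_iff (xs s : List String) :
    (List.foldl PySem.Set.add s xs).length = s.length + xs.length ↔
      xs.Nodup ∧ ∀ x ∈ xs, x ∉ s := by
  induction xs generalizing s with
  | nil => simp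
  | cons x xs ih =>
    simp only [List.foldl_cons, List.length_cons]
    by_cases h : PySem.Set.contains s x
    · simp only [PySem.Set.add, if_pos h]
      have hle := pvFoldlAdd_length_le xs s
      have hx : x ∈ s := (pvContains_iff s x).mp h
      constructor
      · intro heq; omega
      · rintro ⟨_, hall⟩; exact absurd hx (hall x (by simp))
    · simp only [PySem.Set.add, if_neg h]
      have hlen : s.length + (xs.length + 1) = (s ++ [x]).length + xs.length := by
        simp [List.length_append]
        omega
      rw [hlen, ih (s ++ [x])]
      have hx : x ∉ s := fun hmem => h ((pvContains_iff s x).mpr hmem)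
      simp only [List.nodup_cons, List.mem_append, List.mem_cons, List.not_mem_nil, or_false, not_or]
      constructor
      · rintro ⟨hnd, hall⟩
        refine ⟨⟨fun hxm => (hall x hxm).2 rfl, hnd⟩, ?_⟩
        rintro y (rfl | hy)
        · exact hx
        · exact (hall y hy).1
      · rintro ⟨⟨hxnotin, hnd⟩, hall⟩
        exact ⟨hnd, fun y hy => ⟨hall y (Or.inr hy), fun hyx => hxnotin (hyx ▸ hy)⟩⟩

-- B returns true iff the flattened list has no duplicate
theorem pvAlt_true_iff (golfer : String) (L : List (List String)) :
    norepiteenelmismodia_alt golfer L = true ↔ (L.flatMap (fun equipo => equipo)).Nodup := by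
  unfold norepiteenelmismodia_alt
  set todos := L.flatMap (fun equipo => equipo) with htodos
  rw [beq_iff_eq, PySem.Set.ofList]
  rw [show PySem.Set.empty = ([] : List String) from rfl]
  constructor
  · intro h
    have := (pvFoldlAdd_length_eq_iff todos []).mp (by simpa using h.symm)
    exact this.1
  · intro h
    have := (pvFoldlAdd_length_eq_iff todos []).mpr ⟨h, by simp⟩
    simpa using this.symm

-- ===== VERDICT (by name: the statement is the Claim_ definition above) =====
theorem norepiteenelmismodia_spec : Claim_equal_norepiteenelmismodia := by
  intro golfer L _
  unfold Spec_norepiteenelmismodia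
  have hA : norepiteenelmismodia golfer L = true ↔
      (L.flatMap (fun equipo => equipo)).Nodup := by
    unfold norepiteenelmismodia
    rw [pvTeamLoopA_true_iff, ← pvOK_iff_nodup]
    constructor
    · intro h eq heq g hg
      exact (pvGolfLoopA_true_iff eq L eq).mp (h eq heq) g hg
    · intro h eq heq
      exact (pvGolfLoopA_true_iff eq L eq).mpr (h eq heq)
  have hB := pvAlt_true_iff golfer L
  rcases hb : norepiteenelmismodia_alt golfer L with _ | _
  · rcases ha : norepiteenelmismodia golfer L with _ | _
    · rfl
    · exact absurd (hB.mpr (hA.mp ha)) (by simp [hb])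
  · exact hA.mpr (hB.mp hb)
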